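-- pv_equiv track=rewrite | github.com/stefan-mcf/shyftr-lab | src/shyftr/live_context.py | _episode_outcome
-- ===== SOURCE A (Python) =====
-- from typing import Any, Dict, Iterable, List, Mapping, Optional, Sequence, Union
--
-- def _episode_outcome(entries: Sequence[Mapping[str, Any]]) -> str:
--     terminal = [str(entry.get("status") or "") for entry in entries if str(entry.get("status") or "") in {"completed", "resolved", "failed", "blocked", "superseded"}]
--     if not terminal:
--         return "informational"
--     latest_status = terminal[-1]
--     if latest_status in {"completed", "resolved"}:
--         return "success"
--     if latest_status == "failed":
--         return "failure"
--     if latest_status == "blocked":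
--         return "blocked"
--     if latest_status == "superseded":
--         return "superseded"
--     return "informational"
-- ===== SOURCE B (Python) =====
-- _OUTCOME = {
--     "completed": "success",
--     "resolved": "success",
--     "failed": "failure",
--     "blocked": "blocked",
--     "superseded": "superseded",
-- }
--
-- def _episode_outcome(entries):
--     for entry in reversed(entries):
--         status = str(entry.get("status") or "")
--         out = _OUTCOME.get(status)
--         if out is not None:
--             return out
--     return "informational"
-- ===== Notes on version B (the rewrite author's own statement) =====
-- stated objective: simpler
-- what changed: Replaced building the full filtered list of terminal statuses and indexing its last element with a single early-exit reverse scan that maps the first terminal status through a lookup table.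
import Mathlib
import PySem

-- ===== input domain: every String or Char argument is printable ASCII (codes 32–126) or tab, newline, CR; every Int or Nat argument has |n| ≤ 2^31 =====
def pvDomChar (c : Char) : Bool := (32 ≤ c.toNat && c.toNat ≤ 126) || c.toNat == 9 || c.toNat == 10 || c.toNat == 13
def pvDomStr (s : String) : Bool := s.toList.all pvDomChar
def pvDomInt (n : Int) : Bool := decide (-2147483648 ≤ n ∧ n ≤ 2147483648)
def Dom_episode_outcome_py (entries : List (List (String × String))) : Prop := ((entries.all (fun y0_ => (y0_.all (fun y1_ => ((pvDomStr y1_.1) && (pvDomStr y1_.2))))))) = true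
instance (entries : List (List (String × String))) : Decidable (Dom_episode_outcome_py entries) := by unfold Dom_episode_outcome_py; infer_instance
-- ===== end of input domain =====

-- Header: B replaces A's build-full-terminal-list-then-take-last with an early-exit
-- reverse scan through a status→outcome lookup table (objective: simpler).


-- ===== PORT A =====
-- str(entry.get("status") or ""): values are strings here, and `s or ""` is `s`
-- unless s is the empty string, so this is exactly getD with default "".
def pvStatusA (entry : List (String × String)) : String :=
  PySem.Dict.getD (PySem.Dict.mk entry) "status" ""

def pvIsTerminalA (s : String) : Bool :=
  decide (s ∈ (["completed", "resolved", "failed", "blocked", "superseded"] : List String))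

def episode_outcome_py (entries : List (List (String × String))) : String :=
  -- terminal = [str(entry.get("status") or "") for entry in entries if … in {…}]
  let terminal := (entries.filter (fun entry => pvIsTerminalA (pvStatusA entry))).map pvStatusA
  match terminal.getLast? with
  | none => "informational"          -- if not terminal: return "informational"
  | some latest_status =>
    if latest_status = "completed" ∨ latest_status = "resolved" then "success"
    else if latest_status = "failed" then "failure"
    else if latest_status = "blocked" then "blocked"
    else if latest_status = "superseded" then "superseded"
    else "informational"

-- ===== PORT B =====
def pvOutcomeMap : PySem.Dict String String :=
  PySem.Dict.mk [("completed", "success"), ("resolved", "success"), ("failed", "failure"),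
   ("blocked", "blocked"), ("superseded", "superseded")]

def pvStatusB (entry : List (String × String)) : String :=
  PySem.Dict.getD (PySem.Dict.mk entry) "status" ""

-- the early-exit loop over reversed(entries)
def pvRevScan : List (List (String × String)) → String
  | [] => "informational"
  | entry :: rest =>
    match PySem.Dict.get? pvOutcomeMap (pvStatusB entry) with
    | some out => out
    | none => pvRevScan rest

def episode_outcome_py_alt (entries : List (List (String × String))) : String :=
  pvRevScan entries.reverse

-- ===== PRECONDITION & SPEC =====
def Spec_episode_outcome_py (entries : List (List (String × String))) (out : String) : Prop := out = episode_outcome_py_alt entries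
instance (entries : List (List (String × String))) (out : String) : Decidable (Spec_episode_outcome_py entries out) := by unfold Spec_episode_outcome_py; infer_instance

-- ===== CLAIM (what is proved, stated in full; the proofs are below) =====
def Claim_equal_episode_outcome_py : Prop := ∀ (entries : List (List (String × String))), Dom_episode_outcome_py entries → Spec_episode_outcome_py entries (episode_outcome_py entries)

-- ===== LEMMAS AND PROOFS =====

-- the lookup table agrees with A's membership test and if-chain
theorem pvMap_get (s : String) :
    PySem.Dict.get? pvOutcomeMap s =
      if pvIsTerminalA s then
        some (if s = "completed" ∨ s = "resolved" then "success"
              else if s = "failed" then "failure"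
              else if s = "blocked" then "blocked"
              else if s = "superseded" then "superseded"
              else "informational")
      else none := by
  by_cases h1 : s = "completed"
  · subst h1; decide
  by_cases h2 : s = "resolved"
  · subst h2; decide
  by_cases h3 : s = "failed"
  · subst h3; decide
  by_cases h4 : s = "blocked"
  · subst h4; decide
  by_cases h5 : s = "superseded"
  · subst h5; decide
  have e1 : ("completed" == s) = false := by simp; exact Ne.symm h1
  have e2 : ("resolved" == s) = false := by simp; exact Ne.symm h2
  have e3 : ("failed" == s) = false := by simp; exact Ne.symm h3
  have e4 : ("blocked" == s) = false := by simp; exact Ne.symm h4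
  have e5 : ("superseded" == s) = false := by simp; exact Ne.symm h5
  simp [pvOutcomeMap, PySem.Dict.get?, pvIsTerminalA, h1, h2, h3, h4, h5, e1, e2, e3, e4, e5]

-- the reverse scan computes A's answer from the reversed list
theorem pvRevScan_eq (r : List (List (String × String))) :
    pvRevScan r =
      match ((r.filter (fun e => pvIsTerminalA (pvStatusA e))).map pvStatusA).head? with
      | none => "informational"
      | some s =>
        if s = "completed" ∨ s = "resolved" then "success"
        else if s = "failed" then "failure"
        else if s = "blocked" then "blocked"
        else if s = "superseded" then "superseded"
        else "informational" := by
  induction r with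
  | nil => simp [pvRevScan]
  | cons e rest ih =>
    rw [pvRevScan, show pvStatusB = pvStatusA from rfl, pvMap_get]
    by_cases h : pvIsTerminalA (pvStatusA e) <;> simp [h, ih]

theorem episode_outcome_py_spec : Claim_equal_episode_outcome_py := by
  intro entries _
  unfold Spec_episode_outcome_py episode_outcome_py episode_outcome_py_alt
  rw [pvRevScan_eq]
  simp [List.filter_reverse, List.map_reverse, List.head?_reverse]
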